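-- pv_equiv track=rewrite | github.com/Kolosun-Aleksandr/DZ__Py49-onl | 06__18.12.2023__math/DZ__06.py | where_H
-- ===== SOURCE A (Python) =====
-- def where_H(list_1, m, n, h):
--     where = []
--     for i in range(0, n):
--         counter = 0
--         for j in range(0, m):
--             if list_1[j][i] == h:
--                 counter += 1
--         if counter > 0:
--             where.append(i)
--     return where
-- ===== SOURCE B (Python) =====
-- def where_H(list_1, m, n, h):
--     # Row-major single pass collecting hit columns in a set, then sort.
--     if n <= 0:
--         return []
--     cols = set()
--     for j in range(m):
--         for i in range(n):
--             if list_1[j][i] == h: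
--                 cols.add(i)
--     return sorted(cols)
-- ===== Notes on version B (the rewrite author's own statement) =====
-- stated objective: simpler
-- what changed: Replaces the per-column counter and column-major double loop with a row-major scan that collects hit column indices in a set and sorts them, dropping the counter entirely.
import Mathlib
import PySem

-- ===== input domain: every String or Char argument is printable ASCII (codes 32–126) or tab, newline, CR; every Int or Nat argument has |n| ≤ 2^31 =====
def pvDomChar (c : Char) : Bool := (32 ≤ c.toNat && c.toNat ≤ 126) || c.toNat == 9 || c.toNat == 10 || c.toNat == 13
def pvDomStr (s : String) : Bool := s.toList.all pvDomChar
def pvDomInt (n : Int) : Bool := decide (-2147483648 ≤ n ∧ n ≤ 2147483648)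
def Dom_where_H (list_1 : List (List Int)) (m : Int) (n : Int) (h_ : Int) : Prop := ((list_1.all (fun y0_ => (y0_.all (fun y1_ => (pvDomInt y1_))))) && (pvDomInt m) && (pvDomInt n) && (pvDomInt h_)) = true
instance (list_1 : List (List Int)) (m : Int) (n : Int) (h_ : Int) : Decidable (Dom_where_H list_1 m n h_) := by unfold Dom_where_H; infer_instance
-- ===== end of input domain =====

-- B replaces the column-major per-column counter with a row-major scan into a set of
-- column indices, sorted at the end (objective: simpler).

-- ===== PORT A =====
def where_H (list_1 : List (List Int)) (m : Int) (n : Int) (h_ : Int) : List Int :=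
  (PySem.List.pyRange 0 n 1).foldl (fun wh i =>
    let counter : Int :=
      (PySem.List.pyRange 0 m 1).foldl (fun c j =>
        if PySem.List.pyGetD (PySem.List.pyGetD list_1 j []) i 0 == h_ then c + 1 else c) 0
    if 0 < counter then wh ++ [i] else wh) []

-- ===== PORT B =====
def where_H_alt (list_1 : List (List Int)) (m : Int) (n : Int) (h_ : Int) : List Int :=
  if n ≤ 0 then [] else
  let cols : PySem.Set Int :=
    (PySem.List.pyRange 0 m 1).foldl (fun s j =>
      (PySem.List.pyRange 0 n 1).foldl (fun s i =>
        if PySem.List.pyGetD (PySem.List.pyGetD list_1 j []) i 0 == h_ then PySem.Set.add s i else s) s)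
      PySem.Set.empty
  PySem.List.sorted cols (fun x => x) false

-- ===== PRECONDITION & SPEC =====
-- Pre_ excludes exactly the inputs where both Pythons raise IndexError: with positive n and m,
-- fewer than m rows or a row among the first m shorter than n.
def Pre_where_H (list_1 : List (List Int)) (m : Int) (n : Int) (h_ : Int) : Prop :=
  n ≤ 0 ∨ m ≤ 0 ∨ (m ≤ (list_1.length : Int) ∧ ∀ row ∈ list_1.take m.toNat, n ≤ (row.length : Int))
instance (list_1 : List (List Int)) (m : Int) (n : Int) (h_ : Int) : Decidable (Pre_where_H list_1 m n h_) := by unfold Pre_where_H; infer_instance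

def pvWitness_where_H : List (List Int) × Int × Int × Int := ([[1, 2], [3, 1]], 2, 2, 1)

def Spec_where_H (list_1 : List (List Int)) (m : Int) (n : Int) (h_ : Int) (out : List Int) : Prop := out = where_H_alt list_1 m n h_
instance (list_1 : List (List Int)) (m : Int) (n : Int) (h_ : Int) (out : List Int) : Decidable (Spec_where_H list_1 m n h_ out) := by unfold Spec_where_H; infer_instance

-- ===== CLAIM (what is proved, stated in full; the proofs are below) =====
def Claim_equal_where_H : Prop := ∀ (list_1 : List (List Int)) (m : Int) (n : Int) (h_ : Int), Dom_where_H list_1 m n h_ → Pre_where_H list_1 m n h_ → Spec_where_H list_1 m n h_ (where_H list_1 m n h_)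

-- ===== LEMMAS AND PROOFS =====

-- the cell read both ports perform
def pvCell (list_1 : List (List Int)) (j i : Int) : Int :=
  PySem.List.pyGetD (PySem.List.pyGetD list_1 j []) i 0

-- the Boolean "column i has a hit among rows 0..m-1"
def pvHit (list_1 : List (List Int)) (m : Int) (h_ : Int) (i : Int) : Bool :=
  (PySem.List.pyRange 0 m 1).any (fun j => pvCell list_1 j i == h_)

theorem where_H_eq_filter (list_1 : List (List Int)) (m n h_ : Int) :
    where_H list_1 m n h_ = (PySem.List.pyRange 0 n 1).filter (pvHit list_1 m h_) := by
  unfold where_H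
  rw [PySem.List.foldl_congr_mem' _ _
      (fun wh i => if pvHit list_1 m h_ i then wh ++ [i] else wh) []
      (by
        intro i _ wh
        simp only [PySem.List.foldl_count_if]
        have hiff : (0 < (0:Int) + ((PySem.List.pyRange 0 m 1).countP
            (fun j => PySem.List.pyGetD (PySem.List.pyGetD list_1 j []) i 0 == h_) : Int)) ↔
            pvHit list_1 m h_ i = true := by
          rw [zero_add, Int.natCast_pos, List.countP_pos_iff]
          simp [pvHit, pvCell, List.any_eq_true]
        exact if_congr hiff rfl rfl)]
  exact PySem.List.foldl_append_if_eq_filter _ _ []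

-- inner loop of B: membership and nodup
theorem mem_inner_fold (q : Int → Bool) (l : List Int) (s : PySem.Set Int) (x : Int) :
    x ∈ l.foldl (fun s i => if q i then PySem.Set.add s i else s) s ↔
      x ∈ s ∨ (x ∈ l ∧ q x) := by
  induction l generalizing s with
  | nil => simp
  | cons a t ih =>
    simp only [List.foldl_cons, ih]
    split_ifs with ha
    · rw [PySem.Set.mem_add]
      constructor
      · rintro (⟨h | h⟩ | h)
        · exact Or.inl h
        · subst h; exact Or.inr ⟨List.mem_cons_self, ha⟩
        · exact Or.inr ⟨List.mem_cons_of_mem _ h.1, h.2⟩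
      · rintro (h | ⟨hm, hq⟩)
        · exact Or.inl (Or.inl h)
        · rcases List.mem_cons.mp hm with h | h
          · exact Or.inl (Or.inr h)
          · exact Or.inr ⟨h, hq⟩
    · constructor
      · rintro (h | h)
        · exact Or.inl h
        · exact Or.inr ⟨List.mem_cons_of_mem _ h.1, h.2⟩
      · rintro (h | ⟨hm, hq⟩)
        · exact Or.inl h
        · rcases List.mem_cons.mp hm with h | h
          · subst h; exact absurd hq (by simp [ha])
          · exact Or.inr ⟨h, hq⟩

theorem nodup_inner_fold (q : Int → Bool) (l : List Int) (s : PySem.Set Int) (hs : s.Nodup) :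
    (l.foldl (fun s i => if q i then PySem.Set.add s i else s) s).Nodup := by
  induction l generalizing s with
  | nil => exact hs
  | cons a t ih =>
    simp only [List.foldl_cons]
    apply ih
    split_ifs
    · exact PySem.Set.nodup_add _ _ hs
    · exact hs

-- outer loop of B: membership and nodup
theorem mem_outer_fold (q : Int → Int → Bool) (lj li : List Int) (s : PySem.Set Int) (x : Int) :
    x ∈ lj.foldl (fun s j => li.foldl (fun s i => if q j i then PySem.Set.add s i else s) s) s ↔
      x ∈ s ∨ ∃ j ∈ lj, x ∈ li ∧ q j x := by
  induction lj generalizing s with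
  | nil => simp
  | cons a t ih =>
    simp only [List.foldl_cons, ih, mem_inner_fold]
    constructor
    · rintro (⟨h | h⟩ | ⟨j, hj, h⟩)
      · exact Or.inl h
      · exact Or.inr ⟨a, List.mem_cons_self, h⟩
      · exact Or.inr ⟨j, List.mem_cons_of_mem _ hj, h⟩
    · rintro (h | ⟨j, hj, h⟩)
      · exact Or.inl (Or.inl h)
      · rcases List.mem_cons.mp hj with rfl | hj
        · exact Or.inl (Or.inr h)
        · exact Or.inr ⟨j, hj, h⟩

theorem nodup_outer_fold (q : Int → Int → Bool) (lj li : List Int) (s : PySem.Set Int)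
    (hs : s.Nodup) :
    (lj.foldl (fun s j => li.foldl (fun s i => if q j i then PySem.Set.add s i else s) s) s).Nodup := by
  induction lj generalizing s with
  | nil => exact hs
  | cons a t ih => exact ih _ (nodup_inner_fold _ _ _ hs)

theorem where_H_alt_eq_filter (list_1 : List (List Int)) (m n h_ : Int) :
    where_H_alt list_1 m n h_ = (PySem.List.pyRange 0 n 1).filter (pvHit list_1 m h_) := by
  unfold where_H_alt
  by_cases hn : n ≤ 0
  · simp [hn, PySem.List.pyRange_one_eq_nil hn]
  simp only [if_neg hn]
  set q : Int → Int → Bool := fun j i => pvCell list_1 j i == h_ with hq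
  have hcols : ∀ x, x ∈ (PySem.List.pyRange 0 m 1).foldl (fun s j =>
      (PySem.List.pyRange 0 n 1).foldl (fun s i =>
        if PySem.List.pyGetD (PySem.List.pyGetD list_1 j []) i 0 == h_ then PySem.Set.add s i else s) s)
      PySem.Set.empty ↔ x ∈ PySem.List.pyRange 0 n 1 ∧ pvHit list_1 m h_ x = true := by
    intro x
    have := mem_outer_fold q (PySem.List.pyRange 0 m 1) (PySem.List.pyRange 0 n 1)
      PySem.Set.empty x
    simp only [hq, pvCell] at this
    rw [this]
    simp only [PySem.Set.empty, List.not_mem_nil, false_or, pvHit, List.any_eq_true, pvCell]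
    constructor
    · rintro ⟨j, hj, hx, hqx⟩; exact ⟨hx, j, hj, hqx⟩
    · rintro ⟨hx, j, hj, hqx⟩; exact ⟨j, hj, hx, hqx⟩
  have hnd : ((PySem.List.pyRange 0 m 1).foldl (fun s j =>
      (PySem.List.pyRange 0 n 1).foldl (fun s i =>
        if PySem.List.pyGetD (PySem.List.pyGetD list_1 j []) i 0 == h_ then PySem.Set.add s i else s) s)
      PySem.Set.empty).Nodup := by
    have := nodup_outer_fold q (PySem.List.pyRange 0 m 1) (PySem.List.pyRange 0 n 1)
      PySem.Set.empty List.nodup_nil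
    simpa [hq, pvCell] using this
  apply PySem.List.sorted_eq_of_perm_of_pairwise_lt
  · rw [List.perm_ext_iff_of_nodup
      (List.Nodup.filter _ (PySem.List.nodup_pyRange_one 0 n)) hnd]
    intro x
    rw [hcols, List.mem_filter]
  · exact List.Pairwise.filter _ (PySem.List.pairwise_lt_pyRange_one 0 n)

-- ===== VERDICT (by name: the statement is the Claim_ definition above) =====
theorem where_H_spec : Claim_equal_where_H := by
  intro list_1 m n h_ _ _
  unfold Spec_where_H
  rw [where_H_eq_filter, where_H_alt_eq_filter]
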